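-- pv_equiv track=rewrite | github.com/uzair-7886/documents_processing | utils.py | merged_if_no_overlap_otherwise_first
-- ===== SOURCE A (Python) =====
-- def merged_if_no_overlap_otherwise_first(lines):
--     result = ""
--     length = max([0] + [len(line) for line in lines])
--
--     for i in range(length):
--         for line in lines:
--             if len(line) > i and line[i] != " ":
--                 # we already wrote something in that position
--                 if len(result) == i + 1:
--                     return lines[0]
--                 result += line[i]
--         if len(result) == i:
--             result += " "
--
--     return result
-- ===== SOURCE B (Python) =====
-- def merged_if_no_overlap_otherwise_first(lines):
--     n = max(map(len, lines), default=0)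
--     buf = [" "] * n
--     for line in lines:
--         for i, ch in enumerate(line):
--             if ch != " ":
--                 if buf[i] != " ":
--                     return lines[0]
--                 buf[i] = ch
--     return "".join(buf)
-- ===== Notes on version B (the rewrite author's own statement) =====
-- stated objective: alternative
-- what changed: A rescans every line for every column index up to the maximum line length (column-major, growing a result string); B allocates one space-filled buffer of that length and scans each line's characters exactly once (row-major), returning lines[0] on the first position written twice.
import Mathlib
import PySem

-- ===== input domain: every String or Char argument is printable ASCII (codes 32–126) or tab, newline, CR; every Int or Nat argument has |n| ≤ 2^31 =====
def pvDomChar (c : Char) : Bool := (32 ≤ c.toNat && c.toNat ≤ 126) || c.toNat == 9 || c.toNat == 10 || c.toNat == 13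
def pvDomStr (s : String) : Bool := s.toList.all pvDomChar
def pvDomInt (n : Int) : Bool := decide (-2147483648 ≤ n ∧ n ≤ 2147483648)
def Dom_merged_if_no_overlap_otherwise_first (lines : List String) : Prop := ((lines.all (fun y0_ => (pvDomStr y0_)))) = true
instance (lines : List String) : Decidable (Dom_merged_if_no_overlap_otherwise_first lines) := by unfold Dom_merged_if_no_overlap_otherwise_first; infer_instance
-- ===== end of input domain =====

-- B replaces A's column-major rescan of every line per column by one space-filled
-- buffer and a single pass over each line's characters (objective: alternative algorithm).


-- ===== PORT A =====
-- inner 'for line in lines' loop of A; .inl = the function returned early with lines[0]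
-- (the '.getD' reads are exact: they are only reached when 0 ≤ i < len line)
def pvA_inner (first : String) (i : Int) : List String → List Char → Sum String (List Char)
  | [], result => .inr result
  | line :: rest, result =>
      if PySem.Str.len line > i ∧ PySem.Str.pyGet? line i ≠ some ' ' then
        if (result.length : Int) = i + 1 then .inl first
        else pvA_inner first i rest (result ++ [(PySem.Str.pyGet? line i).getD ' '])
      else pvA_inner first i rest result

-- one iteration of A's 'for i in range(length)' loop
def pvA_step (first : String) (lines : List String) (st : Sum String (List Char)) (i : Int) :
    Sum String (List Char) :=
  match st with
  | .inl r => .inl r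
  | .inr result =>
    match pvA_inner first i lines result with
    | .inl r => .inl r
    | .inr result => .inr (if (result.length : Int) = i then result ++ [' '] else result)

def merged_if_no_overlap_otherwise_first (lines : List String) : String :=
  let length : Int := (PySem.List.max? ((0 : Int) :: lines.map (fun l => PySem.Str.len l)) (fun x => x)).getD 0
  let first : String := (PySem.List.pyGet? lines 0).getD ""   -- lines[0]; only used after a second non-space hit, so lines ≠ []
  match (PySem.List.pyRange 0 length 1).foldl (pvA_step first lines) (.inr []) with
  | .inl r => r
  | .inr result => String.ofList result

-- ===== PORT B =====
-- inner 'for i, ch in enumerate(line)' loop of B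
-- (the '.getD'/'.toNat' on buf indices are exact: 0 ≤ i < len line ≤ len buf)
def pvB_line (first : String) : List (Int × Char) → List Char → Sum String (List Char)
  | [], buf => .inr buf
  | (i, ch) :: rest, buf =>
      if ch ≠ ' ' then
        if (PySem.List.pyGet? buf i).getD ' ' ≠ ' ' then .inl first
        else pvB_line first rest (buf.set i.toNat ch)
      else pvB_line first rest buf

-- one iteration of B's 'for line in lines' loop
def pvB_step (first : String) (st : Sum String (List Char)) (line : String) :
    Sum String (List Char) :=
  match st with
  | .inl r => .inl r
  | .inr buf => pvB_line first (PySem.List.enumerate line.toList 0) buf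

def merged_if_no_overlap_otherwise_first_alt (lines : List String) : String :=
  let n : Int := (PySem.List.max? (lines.map (fun l => PySem.Str.len l)) (fun x => x)).getD 0
  let first : String := (PySem.List.pyGet? lines 0).getD ""   -- lines[0]; only used on collision, so lines ≠ []
  match lines.foldl (pvB_step first) (.inr (List.replicate n.toNat ' ')) with
  | .inl r => r
  | .inr buf => String.ofList buf

-- ===== PRECONDITION & SPEC =====
def Spec_merged_if_no_overlap_otherwise_first (lines : List String) (out : String) : Prop := out = merged_if_no_overlap_otherwise_first_alt lines
instance (lines : List String) (out : String) : Decidable (Spec_merged_if_no_overlap_otherwise_first lines out) := by unfold Spec_merged_if_no_overlap_otherwise_first; infer_instance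

-- ===== CLAIM (what is proved, stated in full; the proofs are below) =====
def Claim_equal_merged_if_no_overlap_otherwise_first : Prop := ∀ (lines : List String), Dom_merged_if_no_overlap_otherwise_first lines → Spec_merged_if_no_overlap_otherwise_first lines (merged_if_no_overlap_otherwise_first lines)

-- ===== LEMMAS AND PROOFS =====

-- the non-space character line l contributes at column j (none if l is short there or holds a space)
def pvLineCol (l : String) (j : Nat) : Option Char :=
  match l.toList[j]? with
  | some c => if c = ' ' then none else some c
  | none => none

-- the non-space characters of all lines at column j, in line order
def pvColC (lines : List String) (j : Nat) : List Char :=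
  lines.flatMap (fun l => (pvLineCol l j).toList)

-- the merged line of width n
def pvMerged (lines : List String) (n : Nat) : List Char :=
  (List.range n).map (fun j => (pvColC lines j).headD ' ')

-- maximum line length
def pvLen (lines : List String) : Nat := (lines.map (fun l => l.toList.length)).foldl max 0

theorem pvColC_cons (l : String) (ls : List String) (j : Nat) :
    pvColC (l :: ls) j = (pvLineCol l j).toList ++ pvColC ls j := rfl

theorem pvColC_append (P Q : List String) (j : Nat) :
    pvColC (P ++ Q) j = pvColC P j ++ pvColC Q j := by
  simp [pvColC]

theorem mem_pvColC_ne_space {lines : List String} {j : Nat} {c : Char}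
    (h : c ∈ pvColC lines j) : c ≠ ' ' := by
  simp only [pvColC, List.mem_flatMap] at h
  obtain ⟨l, _, hc⟩ := h
  unfold pvLineCol at hc
  rcases hl : l.toList[j]? with _ | d <;> simp [hl] at hc
  rcases hc with ⟨h1, h2⟩; subst h2; exact h1

theorem pvLineCol_some_lt {l : String} {j : Nat} {c : Char} (h : pvLineCol l j = some c) :
    j < l.toList.length ∧ l.toList.getD j ' ' = c ∧ c ≠ ' ' := by
  unfold pvLineCol at h
  rcases hl : l.toList[j]? with _ | d <;> rw [hl] at h
  · simp at h
  · have hj : j < l.toList.length := by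
      by_contra hge
      rw [List.getElem?_eq_none_iff.mpr (by omega)] at hl; cases hl
    by_cases hd : d = ' ' <;> simp [hd] at h
    refine ⟨hj, ?_, ?_⟩
    · rw [List.getD_eq_getElem?_getD, hl, h]; rfl
    · rw [← h]; exact hd

theorem pvLineCol_eq_of_lt (l : String) (j : Nat) (h : j < l.toList.length) :
    pvLineCol l j = if l.toList.getD j ' ' = ' ' then none else some (l.toList.getD j ' ') := by
  unfold pvLineCol
  rw [List.getElem?_eq_getElem h]
  simp [List.getD_eq_getElem?_getD, List.getElem?_eq_getElem h]

theorem pvColC_headD_ne_space_iff (P : List String) (j : Nat) :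
    ((pvColC P j).headD ' ' ≠ ' ') ↔ pvColC P j ≠ [] := by
  rcases h : pvColC P j with _ | ⟨c, t⟩
  · simp
  · simp only [List.headD_cons, ne_eq]
    have : c ≠ ' ' := mem_pvColC_ne_space (h ▸ List.mem_cons_self)
    simp [this]

theorem pv_init_le_foldl_max (xs : List Nat) (a : Nat) : a ≤ xs.foldl max a := by
  induction xs generalizing a with
  | nil => simp
  | cons y ys ih => exact le_trans (le_max_left a y) (by simpa using ih (max a y))

theorem pv_mem_le_foldl_max (xs : List Nat) (a : Nat) : ∀ x ∈ xs, x ≤ xs.foldl max a := by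
  induction xs generalizing a with
  | nil => simp
  | cons y ys ih =>
    intro x hx
    rcases List.mem_cons.mp hx with h | h
    · subst h
      exact le_trans (le_max_right a x) (by simpa using pv_init_le_foldl_max ys (max a x))
    · simpa using ih (max a y) x h

theorem pvLen_ge (lines : List String) : ∀ l ∈ lines, l.toList.length ≤ pvLen lines := by
  intro l hl
  exact pv_mem_le_foldl_max _ 0 _ (List.mem_map_of_mem hl)

theorem pv_foldl_max_cast (xs : List Nat) (a : Nat) :
    (xs.map (fun (x : Nat) => (x : Int))).foldl max ((a : Nat) : Int) = ((xs.foldl max a : Nat) : Int) := by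
  induction xs generalizing a with
  | nil => simp
  | cons y ys ih =>
    simp only [List.map_cons, List.foldl_cons]
    rw [← Nat.cast_max, ih (max a y)]

theorem pv_getD_set_ne (buf : List Char) (s j : Nat) (c : Char) (h : j ≠ s) :
    (buf.set s c).getD j ' ' = buf.getD j ' ' := by
  simp [List.getD_eq_getElem?_getD, (Ne.symm h : s ≠ j)]

theorem pv_getD_set_self (buf : List Char) (s : Nat) (c : Char) (h : s < buf.length) :
    (buf.set s c).getD s ' ' = c := by
  simp [List.getD_eq_getElem?_getD, h]

theorem pv_getD_map_range (n j : Nat) (f : Nat → Char) (h : j < n) :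
    ((List.range n).map f).getD j ' ' = f j := by
  simp [List.getD_eq_getElem?_getD, List.getElem?_map, List.getElem?_range h]

theorem pv_map_range_getD (buf : List Char) :
    (List.range buf.length).map (fun j => buf.getD j ' ') = buf := by
  apply List.ext_getElem (by simp)
  intro i h1 h2
  simp [List.getD_eq_getElem?_getD, List.getElem?_eq_getElem h2]

theorem pvMerged_length (P : List String) (n : Nat) : (pvMerged P n).length = n := by
  simp [pvMerged]

theorem pvMerged_getD (P : List String) (n j : Nat) (h : j < n) :
    (pvMerged P n).getD j ' ' = (pvColC P j).headD ' ' := pv_getD_map_range n j _ h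

theorem pvMerged_nil (n : Nat) : pvMerged [] n = List.replicate n ' ' := by
  simp [pvMerged, pvColC]

-- stickiness of the early return in B's outer loop
theorem B_sticky (first : String) (r : String) (ls : List String) :
    ls.foldl (pvB_step first) (.inl r) = .inl r := by
  induction ls with
  | nil => rfl
  | cons l ls ih => simpa [pvB_step] using ih

-- ---------- A's inner loop ----------

-- A's inner loop when a character was already written at column i: any further hit returns lines[0]
theorem pvA_inner_full (first : String) (i : Nat) (ls : List String) (result : List Char)
    (h : result.length = i + 1) :
    pvA_inner first (i : Int) ls result =
      if pvColC ls i = [] then .inr result else .inl first := by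
  induction ls with
  | nil => simp [pvA_inner, pvColC]
  | cons line rest ih =>
    rw [pvColC_cons]
    rcases hc : pvLineCol line i with _ | c
    · have hlen : PySem.Str.len line = ((line.toList.length : Nat) : Int) := by simp
      have hg : ¬ (PySem.Str.len line > (i : Int) ∧ PySem.Str.pyGet? line (i : Int) ≠ some ' ') := by
        rintro ⟨h1, h2⟩
        rw [hlen] at h1
        unfold pvLineCol at hc
        rcases hl : line.toList[i]? with _ | d <;> rw [hl] at hc
        · have : line.toList.length ≤ i := by
            by_contra hgt
            rw [List.getElem?_eq_getElem (by omega)] at hl; cases hl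
          omega
        · by_cases hd : d = ' '
          · subst hd; exact h2 (by simp [hl])
          · simp [hd] at hc
      rw [pvA_inner, if_neg hg]
      simpa using ih
    · obtain ⟨hj, hgd, hcs⟩ := pvLineCol_some_lt hc
      have hget : PySem.Str.pyGet? line (i : Int) = some c := by
        rw [List.getD_eq_getElem?_getD, List.getElem?_eq_getElem hj, Option.getD_some] at hgd
        simp only [PySem.Str.pyGet?_natCast]
        rw [List.getElem?_eq_getElem hj, hgd]
      have hlen : PySem.Str.len line = ((line.toList.length : Nat) : Int) := by simp
      have hg : PySem.Str.len line > (i : Int) ∧ PySem.Str.pyGet? line (i : Int) ≠ some ' ' := by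
        constructor
        · rw [hlen]; exact_mod_cast hj
        · rw [hget]; simp [hcs]
      rw [pvA_inner, if_pos hg, if_pos (by rw [h]; push_cast; ring)]
      simp [Option.toList_some]

-- A's inner loop in the normal state (result holds exactly i characters)
theorem pvA_inner_main (first : String) (i : Nat) (ls : List String) (result : List Char)
    (h : result.length = i) :
    pvA_inner first (i : Int) ls result =
      match pvColC ls i with
      | [] => .inr result
      | [c] => .inr (result ++ [c])
      | _ => .inl first := by
  induction ls with
  | nil => simp [pvA_inner, pvColC]
  | cons line rest ih =>
    rw [pvColC_cons]
    rcases hc : pvLineCol line i with _ | c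
    · have hlen : PySem.Str.len line = ((line.toList.length : Nat) : Int) := by simp
      have hg : ¬ (PySem.Str.len line > (i : Int) ∧ PySem.Str.pyGet? line (i : Int) ≠ some ' ') := by
        rintro ⟨h1, h2⟩
        rw [hlen] at h1
        unfold pvLineCol at hc
        rcases hl : line.toList[i]? with _ | d <;> rw [hl] at hc
        · have : line.toList.length ≤ i := by
            by_contra hgt
            rw [List.getElem?_eq_getElem (by omega)] at hl; cases hl
          omega
        · by_cases hd : d = ' '
          · subst hd; exact h2 (by simp [hl])
          · simp [hd] at hc
      rw [pvA_inner, if_neg hg]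
      simpa using ih
    · obtain ⟨hj, hgd, hcs⟩ := pvLineCol_some_lt hc
      have hget : PySem.Str.pyGet? line (i : Int) = some c := by
        rw [List.getD_eq_getElem?_getD, List.getElem?_eq_getElem hj, Option.getD_some] at hgd
        simp only [PySem.Str.pyGet?_natCast]
        rw [List.getElem?_eq_getElem hj, hgd]
      have hlen : PySem.Str.len line = ((line.toList.length : Nat) : Int) := by simp
      have hg : PySem.Str.len line > (i : Int) ∧ PySem.Str.pyGet? line (i : Int) ≠ some ' ' := by
        constructor
        · rw [hlen]; exact_mod_cast hj
        · rw [hget]; simp [hcs]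
      rw [pvA_inner, if_pos hg, if_neg (by rw [h]; omega), hget]
      simp only [Option.getD_some, Option.toList_some]
      rw [pvA_inner_full first i rest (result ++ [c]) (by simp [h])]
      rcases pvColC rest i with _ | ⟨d, t⟩ <;> simp

-- ---------- A's outer loop ----------

theorem pvA_outer (first : String) (lines : List String) (k : Nat) :
    (List.range k).foldl (fun st (j : Nat) => pvA_step first lines st (j : Int)) (.inr []) =
      if ∀ j < k, (pvColC lines j).length ≤ 1 then .inr (pvMerged lines k) else .inl first := by
  induction k with
  | zero => simp [pvMerged]
  | succ k ih =>
    rw [List.range_succ, List.foldl_append, ih, List.foldl_cons, List.foldl_nil]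
    by_cases hok : ∀ j < k, (pvColC lines j).length ≤ 1
    · rw [if_pos hok]
      have hstep : pvA_step first lines (.inr (pvMerged lines k)) (k : Int) =
          match pvColC lines k with
          | [] => .inr (pvMerged lines (k + 1))
          | [c] => .inr (pvMerged lines (k + 1))
          | _ => .inl first := by
        show (match pvA_inner first (k : Int) lines (pvMerged lines k) with
          | .inl r => (.inl r : Sum String (List Char))
          | .inr result => .inr (if (result.length : Int) = (k : Int) then result ++ [' '] else result)) = _
        rw [pvA_inner_main first k lines (pvMerged lines k) (pvMerged_length lines k)]
        rcases hcol : pvColC lines k with _ | ⟨c, t⟩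
        · simp only []
          rw [if_pos (by rw [pvMerged_length])]
          simp [pvMerged, List.range_succ, hcol]
        · rcases t with _ | ⟨d, t'⟩
          · simp only []
            rw [if_neg (by
              rw [List.length_append, pvMerged_length]
              simp only [List.length_cons, List.length_nil]
              push_cast; omega)]
            simp [pvMerged, List.range_succ, hcol]
          · simp only []
      rcases hcol : pvColC lines k with _ | ⟨c, t⟩
      · rw [hstep, hcol]
        rw [if_pos (by intro j hj; rcases Nat.lt_succ_iff_lt_or_eq.mp hj with h | h
                       · exact hok j h
                       · subst h; simp [hcol])]
      · rcases t with _ | ⟨d, t'⟩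
        · rw [hstep, hcol]
          rw [if_pos (by intro j hj; rcases Nat.lt_succ_iff_lt_or_eq.mp hj with h | h
                         · exact hok j h
                         · subst h; simp [hcol])]
        · rw [hstep, hcol]
          rw [if_neg (by intro hall; have := hall k (by omega); rw [hcol] at this; simp at this)]
    · rw [if_neg hok, if_neg (by intro hall; exact hok (fun j hj => hall j (by omega)))]
      rfl

-- ---------- B's per-line loop ----------

-- the buffer after writing a line's non-space characters, shifted by s
def pvOverlay (s : Nat) (cs buf : List Char) : List Char :=
  (List.range buf.length).map (fun j =>
    if s ≤ j ∧ j < s + cs.length ∧ cs.getD (j - s) ' ' ≠ ' ' then cs.getD (j - s) ' ' else buf.getD j ' ')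

theorem pvOverlay_nil (s : Nat) (buf : List Char) : pvOverlay s [] buf = buf := by
  unfold pvOverlay
  have : ∀ j, (if s ≤ j ∧ j < s + ([] : List Char).length ∧ ([] : List Char).getD (j - s) ' ' ≠ ' '
      then ([] : List Char).getD (j - s) ' ' else buf.getD j ' ') = buf.getD j ' ' := by
    intro j; rw [if_neg (by simp)]
  simp only [this]
  exact pv_map_range_getD buf

theorem pvOverlay_cons_space (s : Nat) (cs' buf : List Char) :
    pvOverlay s (' ' :: cs') buf = pvOverlay (s + 1) cs' buf := by
  unfold pvOverlay
  apply List.map_congr_left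
  intro j hj
  simp only [List.length_cons]
  rcases Nat.lt_trichotomy j s with h | h | h
  · rw [if_neg (by rintro ⟨h1, _, _⟩; omega), if_neg (by rintro ⟨h1, _, _⟩; omega)]
  · subst h
    rw [if_neg (by rintro ⟨_, _, h3⟩; exact h3 (by simp)),
        if_neg (by rintro ⟨h1, _, _⟩; omega)]
  · have hd : (' ' :: cs').getD (j - s) ' ' = cs'.getD (j - (s + 1)) ' ' := by
      rw [show j - s = (j - (s + 1)) + 1 from by omega, List.getD_cons_succ]
    rw [hd]
    by_cases hcnd : s + 1 ≤ j ∧ j < s + 1 + cs'.length ∧ cs'.getD (j - (s + 1)) ' ' ≠ ' '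
    · obtain ⟨h1, h2, h3⟩ := hcnd
      rw [if_pos ⟨by omega, by omega, h3⟩, if_pos ⟨h1, h2, h3⟩]
    · rw [if_neg (by rintro ⟨g1, g2, g3⟩; exact hcnd ⟨by omega, by omega, g3⟩), if_neg hcnd]

theorem pvOverlay_cons_char (s : Nat) (cs' buf : List Char) (c : Char) (hc : c ≠ ' ')
    (hs : s < buf.length) :
    pvOverlay s (c :: cs') buf = pvOverlay (s + 1) cs' (buf.set s c) := by
  unfold pvOverlay
  rw [List.length_set]
  apply List.map_congr_left
  intro j hj
  have hjlen : j < buf.length := List.mem_range.mp hj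
  simp only [List.length_cons]
  rcases Nat.lt_trichotomy j s with h | h | h
  · rw [if_neg (by rintro ⟨h1, _, _⟩; omega), if_neg (by rintro ⟨h1, _, _⟩; omega),
        pv_getD_set_ne buf s j c (by omega)]
  · subst h
    rw [if_pos ⟨le_refl j, by omega, by simpa using hc⟩,
        if_neg (by rintro ⟨h1, _, _⟩; omega), pv_getD_set_self buf j c hjlen]
    simp
  · have hd : (c :: cs').getD (j - s) ' ' = cs'.getD (j - (s + 1)) ' ' := by
      rw [show j - s = (j - (s + 1)) + 1 from by omega, List.getD_cons_succ]
    rw [hd, pv_getD_set_ne buf s j c (by omega)]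
    by_cases hcnd : s + 1 ≤ j ∧ j < s + 1 + cs'.length ∧ cs'.getD (j - (s + 1)) ' ' ≠ ' '
    · obtain ⟨h1, h2, h3⟩ := hcnd
      rw [if_pos ⟨by omega, by omega, h3⟩, if_pos ⟨h1, h2, h3⟩]
    · rw [if_neg (by rintro ⟨g1, g2, g3⟩; exact hcnd ⟨by omega, by omega, g3⟩), if_neg hcnd]

theorem pvB_line_gen (first : String) (cs : List Char) (s : Nat) (buf : List Char)
    (hs : s + cs.length ≤ buf.length) :
    pvB_line first (PySem.List.enumerate cs (s : Int)) buf =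
      if ∀ k < cs.length, cs.getD k ' ' = ' ' ∨ buf.getD (s + k) ' ' = ' '
      then .inr (pvOverlay s cs buf) else .inl first := by
  induction cs generalizing s buf with
  | nil =>
    rw [if_pos (by intro k hk; exact absurd hk (by simp)), pvOverlay_nil]
    simp [pvB_line]
  | cons c cs' ih =>
    rw [show ((s : Nat) : Int) = (s : Int) from rfl, PySem.List.enumerate_cons]
    by_cases hc : c = ' '
    · subst hc
      rw [pvB_line, if_neg (by simp)]
      rw [show ((s : Int) + 1) = ((s + 1 : Nat) : Int) by push_cast; ring]
      rw [ih (s + 1) buf (by simp at hs ⊢; omega)]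
      by_cases hcnd : ∀ k < cs'.length, cs'.getD k ' ' = ' ' ∨ buf.getD (s + 1 + k) ' ' = ' '
      · rw [if_pos hcnd, if_pos ?side, pvOverlay_cons_space]
        case side =>
          intro k hk
          rcases k with _ | k'
          · left; rfl
          · have := hcnd k' (by simpa using hk)
            rcases this with h | h
            · left; simpa using h
            · right; rw [show s + (k' + 1) = s + 1 + k' from by omega]; exact h
      · rw [if_neg hcnd, if_neg ?side]
        case side =>
          intro hall
          apply hcnd
          intro k hk
          have := hall (k + 1) (by simpa using Nat.succ_lt_succ hk)
          rcases this with h | h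
          · left; simpa using h
          · right; rw [show s + 1 + k = s + (k + 1) by omega]; exact h
    · rw [pvB_line, if_pos (by simpa using hc)]
      have hslt : s < buf.length := by simp at hs; omega
      have hbufget : (PySem.List.pyGet? buf (s : Int)).getD ' ' = buf.getD s ' ' := by
        rw [PySem.List.pyGet?_natCast, List.getD_eq_getElem?_getD]
      by_cases hb : buf.getD s ' ' = ' '
      · rw [if_neg (by rw [hbufget, hb]; simp)]
        rw [show ((s : Int) + 1) = ((s + 1 : Nat) : Int) by push_cast; ring]
        rw [show ((s : Int)).toNat = s from Int.toNat_natCast s]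
        rw [ih (s + 1) (buf.set s c) (by simp at hs ⊢; omega)]
        by_cases hcnd : ∀ k < cs'.length, cs'.getD k ' ' = ' ' ∨ (buf.set s c).getD (s + 1 + k) ' ' = ' '
        · rw [if_pos hcnd, if_pos ?side, pvOverlay_cons_char s cs' buf c hc hslt]
          case side =>
            intro k hk
            rcases k with _ | k'
            · right; simpa using hb
            · have := hcnd k' (by simpa using hk)
              rcases this with h | h
              · left; simpa using h
              · right
                rw [pv_getD_set_ne buf s (s + 1 + k') c (by omega)] at h
                rw [show s + (k' + 1) = s + 1 + k' from by omega]
                exact h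
        · rw [if_neg hcnd, if_neg ?side]
          case side =>
            intro hall
            apply hcnd
            intro k hk
            have := hall (k + 1) (by simpa using Nat.succ_lt_succ hk)
            rcases this with h | h
            · left; simpa using h
            · right
              rw [pv_getD_set_ne buf s (s + 1 + k) c (by omega),
                  show s + 1 + k = s + (k + 1) from by omega]
              exact h
      · rw [if_pos (by rw [hbufget]; simpa using hb)]
        rw [if_neg ?side]
        case side =>
          intro hall
          have := hall 0 (by simp)
          rcases this with h | h
          · exact hc (by simpa using h)
          · exact hb (by simpa using h)

-- ---------- B's per-line loop against the merged buffer ----------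

theorem pvB_line_merged (first : String) (l : String) (n : Nat) (P : List String)
    (hl : l.toList.length ≤ n) :
    pvB_line first (PySem.List.enumerate l.toList 0) (pvMerged P n) =
      if ∀ k < l.toList.length, pvLineCol l k = none ∨ pvColC P k = []
      then .inr (pvMerged (P ++ [l]) n) else .inl first := by
  have h0 : ((0 : Int)) = ((0 : Nat) : Int) := by norm_num
  rw [h0, pvB_line_gen first l.toList 0 (pvMerged P n) (by rw [pvMerged_length]; omega)]
  have hcnd : (∀ k < l.toList.length, l.toList.getD k ' ' = ' ' ∨ (pvMerged P n).getD (0 + k) ' ' = ' ')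
      ↔ (∀ k < l.toList.length, pvLineCol l k = none ∨ pvColC P k = []) := by
    constructor <;> intro h k hk <;> have hkn : k < n := by omega
    · rcases h k hk with hsp | hmc
      · left; rw [pvLineCol_eq_of_lt l k hk, if_pos hsp]
      · right
        rw [show (0 + k) = k by omega, pvMerged_getD P n k hkn] at hmc
        by_contra hne
        exact ((pvColC_headD_ne_space_iff P k).mpr hne) hmc
    · rcases h k hk with hnone | hnil
      · left
        rw [pvLineCol_eq_of_lt l k hk] at hnone
        by_contra hsp
        rw [if_neg hsp] at hnone; cases hnone
      · right
        rw [show (0 + k) = k by omega, pvMerged_getD P n k hkn, hnil]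
        rfl
  by_cases h : ∀ k < l.toList.length, pvLineCol l k = none ∨ pvColC P k = []
  · rw [if_pos (hcnd.mpr h), if_pos h]
    congr 1
    unfold pvOverlay
    rw [pvMerged_length]
    conv_rhs => rw [pvMerged]
    apply List.map_congr_left
    intro j hj
    have hjn : j < n := List.mem_range.mp hj
    rw [pvColC_append]
    have hsingle : pvColC [l] j = (pvLineCol l j).toList := by simp [pvColC]
    rw [hsingle]
    by_cases hjl : j < l.toList.length
    · rcases h j hjl with hnone | hnil
      · rw [hnone]
        rw [if_neg (by
          rintro ⟨_, _, hne⟩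
          rw [pvLineCol_eq_of_lt l j hjl] at hnone
          rw [Nat.sub_zero] at hne
          rw [if_neg hne] at hnone; cases hnone)]
        rw [pvMerged_getD P n j hjn]
        simp
      · rw [hnil]
        simp only [List.nil_append]
        by_cases hsp : l.toList.getD j ' ' = ' '
        · rw [if_neg (by rintro ⟨_, _, hne⟩; rw [Nat.sub_zero] at hne; exact hne hsp)]
          rw [pvMerged_getD P n j hjn, hnil, pvLineCol_eq_of_lt l j hjl, if_pos hsp]
          simp
        · rw [if_pos ⟨by omega, by omega, by rw [Nat.sub_zero]; exact hsp⟩]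
          rw [pvLineCol_eq_of_lt l j hjl, if_neg hsp]
          simp
    · rw [if_neg (by rintro ⟨_, hlt, _⟩; omega)]
      have : pvLineCol l j = none := by
        unfold pvLineCol
        rw [List.getElem?_eq_none_iff.mpr (by omega)]
      rw [this, pvMerged_getD P n j hjn]
      simp
  · rw [if_neg (fun hh => h (hcnd.mp hh)), if_neg h]

-- ---------- B's outer loop ----------

theorem pvB_outer (first : String) (n : Nat) (suf : List String) (P : List String)
    (hP : ∀ l ∈ P, l.toList.length ≤ n) (hsuf : ∀ l ∈ suf, l.toList.length ≤ n)
    (hok : ∀ j, (pvColC P j).length ≤ 1) :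
    suf.foldl (pvB_step first) (.inr (pvMerged P n)) =
      if ∀ j < n, (pvColC (P ++ suf) j).length ≤ 1
      then .inr (pvMerged (P ++ suf) n) else .inl first := by
  induction suf generalizing P with
  | nil =>
    rw [List.foldl_nil, List.append_nil, if_pos (fun j _ => hok j)]
  | cons l suf' ih =>
    rw [List.foldl_cons]
    have hstep : pvB_step first (.inr (pvMerged P n)) l =
        pvB_line first (PySem.List.enumerate l.toList 0) (pvMerged P n) := rfl
    rw [hstep, pvB_line_merged first l n P (hsuf l List.mem_cons_self)]
    by_cases hcol : ∀ k < l.toList.length, pvLineCol l k = none ∨ pvColC P k = []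
    · rw [if_pos hcol]
      have hok' : ∀ j, (pvColC (P ++ [l]) j).length ≤ 1 := by
        intro j
        rw [pvColC_append]
        have hsingle : pvColC [l] j = (pvLineCol l j).toList := by simp [pvColC]
        rw [hsingle, List.length_append]
        rcases hlc : pvLineCol l j with _ | c
        · simpa using hok j
        · have hjl : j < l.toList.length := (pvLineCol_some_lt hlc).1
          rcases hcol j hjl with hnone | hnil
          · rw [hnone] at hlc; cases hlc
          · rw [hnil]; simp
      have hP' : ∀ m ∈ P ++ [l], m.toList.length ≤ n := by
        intro m hm
        rcases List.mem_append.mp hm with h | h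
        · exact hP m h
        · rw [List.mem_singleton.mp h]; exact hsuf l List.mem_cons_self
      have := ih (P ++ [l]) hP' (fun m hm => hsuf m (List.mem_cons_of_mem l hm)) hok'
      rw [this]
      simp [List.append_assoc]
    · rw [if_neg hcol, B_sticky]
      rw [if_neg ?bad]
      case bad =>
        intro hall
        apply hcol
        intro k hk
        have hkn : k < n := by have := hsuf l List.mem_cons_self; omega
        have hlen := hall k hkn
        rw [show P ++ l :: suf' = (P ++ [l]) ++ suf' by simp, pvColC_append, pvColC_append] at hlen
        have hsingle : pvColC [l] k = (pvLineCol l k).toList := by simp [pvColC]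
        rw [hsingle, List.length_append, List.length_append] at hlen
        rcases hlc : pvLineCol l k with _ | c
        · left; rfl
        · right
          rw [hlc] at hlen
          simp only [Option.toList_some, List.length_singleton] at hlen
          rcases hnil : pvColC P k with _ | ⟨d, t⟩
          · rfl
          · rw [hnil] at hlen; simp at hlen; omega

-- ---------- lengths computed by the two ports ----------

theorem pv_map_len (lines : List String) :
    lines.map (fun l => PySem.Str.len l) = (lines.map (fun l => l.toList.length)).map (fun x => ((x : Nat) : Int)) := by
  rw [List.map_map]
  apply List.map_congr_left
  intro l _
  simp

theorem pvLenA (lines : List String) :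
    (PySem.List.max? ((0 : Int) :: lines.map (fun l => PySem.Str.len l)) (fun x => x)).getD 0
      = ((pvLen lines : Nat) : Int) := by
  rw [PySem.List.max?_id_cons, Option.getD_some, pv_map_len]
  rw [show ((0 : Int)) = ((0 : Nat) : Int) from rfl, pv_foldl_max_cast]
  rfl

theorem pvLenB (lines : List String) :
    (PySem.List.max? (lines.map (fun l => PySem.Str.len l)) (fun x => x)).getD 0
      = ((pvLen lines : Nat) : Int) := by
  rcases lines with _ | ⟨l, rest⟩
  · simp [PySem.List.max?, pvLen]
  · rw [List.map_cons, PySem.List.max?_id_cons, Option.getD_some]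
    rw [pv_map_len rest]
    rw [show PySem.Str.len l = ((l.toList.length : Nat) : Int) by simp, pv_foldl_max_cast]
    unfold pvLen
    rw [List.map_cons, List.foldl_cons, Nat.zero_max]

-- ===== VERDICT (by name: the statement is the Claim_ definition above) =====
theorem merged_if_no_overlap_otherwise_first_spec : Claim_equal_merged_if_no_overlap_otherwise_first := by
  intro lines _
  unfold Spec_merged_if_no_overlap_otherwise_first
  unfold merged_if_no_overlap_otherwise_first merged_if_no_overlap_otherwise_first_alt
  rw [pvLenA, pvLenB]
  set first : String := (PySem.List.pyGet? lines 0).getD "" with hfirst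
  set L : Nat := pvLen lines with hL
  have hA : (PySem.List.pyRange 0 ((L : Nat) : Int) 1).foldl (pvA_step first lines) (.inr []) =
      if ∀ j < L, (pvColC lines j).length ≤ 1 then .inr (pvMerged lines L) else .inl first := by
    rw [PySem.List.pyRange_zero_natCast, List.foldl_map]
    exact pvA_outer first lines L
  have hB : lines.foldl (pvB_step first) (.inr (List.replicate (((L : Nat) : Int)).toNat ' ')) =
      if ∀ j < L, (pvColC lines j).length ≤ 1 then .inr (pvMerged lines L) else .inl first := by
    rw [show (((L : Nat) : Int)).toNat = L from Int.toNat_natCast L, ← pvMerged_nil]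
    rw [pvB_outer first L lines [] (by simp) (pvLen_ge lines) (by intro j; simp [pvColC])]
    simp
  simp only [hA, hB]
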